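-- pv_equiv track=rewrite | github.com/Diwakarsrd/Resume-Relevance-System | api/index.py | are_skills_similar
-- ===== SOURCE A (Python) =====
-- def are_skills_similar(skill1: str, skill2: str) -> bool:
--     """Check if two skills are similar"""
--     # Simple similarity mapping
--     synonyms = {
--         'javascript': ['js', 'node.js', 'nodejs'],
--         'python': ['py'],
--         'machine learning': ['ml', 'ai', 'artificial intelligence'],
--         'postgresql': ['postgres'],
--         'mongodb': ['mongo'],
--         'kubernetes': ['k8s'],
--         'docker': ['containerization'],
--         'aws': ['amazon web services'],
--         'gcp': ['google cloud'],
--         'azure': ['microsoft azure']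
--     }
--
--     for main_skill, variations in synonyms.items():
--         if (skill1 == main_skill and skill2 in variations) or \
--            (skill2 == main_skill and skill1 in variations):
--             return True
--
--     return False
-- ===== SOURCE B (Python) =====
-- def are_skills_similar(skill1: str, skill2: str) -> bool:
--     """Check if two skills are similar"""
--     synonyms = {
--         'javascript': ['js', 'node.js', 'nodejs'],
--         'python': ['py'],
--         'machine learning': ['ml', 'ai', 'artificial intelligence'],
--         'postgresql': ['postgres'],
--         'mongodb': ['mongo'],
--         'kubernetes': ['k8s'],
--         'docker': ['containerization'],
--         'aws': ['amazon web services'],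
--         'gcp': ['google cloud'],
--         'azure': ['microsoft azure']
--     }
--     reverse = {v: m for m, vs in synonyms.items() for v in vs}
--     return reverse.get(skill1) == skill2 or reverse.get(skill2) == skill1
-- ===== Notes on version B (the rewrite author's own statement) =====
-- stated objective: simpler
-- what changed: Replaces the scan over every (main, variations) entry with a reverse variation->main index built once by a comprehension, so the answer is two O(1) lookups with no loop or membership test.
import Mathlib
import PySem

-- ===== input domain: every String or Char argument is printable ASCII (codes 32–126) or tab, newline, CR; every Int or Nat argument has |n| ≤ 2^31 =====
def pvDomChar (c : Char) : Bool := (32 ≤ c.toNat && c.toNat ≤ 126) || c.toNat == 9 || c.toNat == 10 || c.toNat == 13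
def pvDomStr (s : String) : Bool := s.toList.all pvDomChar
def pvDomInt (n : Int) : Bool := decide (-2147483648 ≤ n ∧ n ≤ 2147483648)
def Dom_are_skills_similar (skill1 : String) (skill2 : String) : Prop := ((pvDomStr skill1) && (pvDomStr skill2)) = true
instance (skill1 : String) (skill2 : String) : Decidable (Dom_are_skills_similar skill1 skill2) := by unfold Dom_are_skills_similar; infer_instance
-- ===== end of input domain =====

-- B replaces A's scan over every (main, variations) entry with a reverse
-- variation -> main index built once, so the answer is two direct lookups (objective: simpler).

-- ===== PORT A =====
-- the literal synonyms table (dict iterated in insertion order -> list of pairs)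
def pvSynonyms : List (String × List String) :=
  [ ("javascript", ["js", "node.js", "nodejs"]),
    ("python", ["py"]),
    ("machine learning", ["ml", "ai", "artificial intelligence"]),
    ("postgresql", ["postgres"]),
    ("mongodb", ["mongo"]),
    ("kubernetes", ["k8s"]),
    ("docker", ["containerization"]),
    ("aws", ["amazon web services"]),
    ("gcp", ["google cloud"]),
    ("azure", ["microsoft azure"]) ]

-- the for-loop with its early 'return True'
def pvLoopA (skill1 skill2 : String) : List (String × List String) → Bool
  | [] => false
  | (m, vs) :: rest =>
    if (skill1 == m && vs.contains skill2) || (skill2 == m && vs.contains skill1) then true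
    else pvLoopA skill1 skill2 rest

def are_skills_similar (skill1 : String) (skill2 : String) : Bool :=
  pvLoopA skill1 skill2 pvSynonyms

-- ===== PORT B =====
-- reverse = {v: m for m, vs in synonyms.items() for v in vs}
def pvReverse : PySem.Dict String String :=
  pvSynonyms.foldl (fun d p => p.2.foldl (fun d v => d.insert v p.1) d) PySem.Dict.empty

-- reverse.get(skill1) == skill2 or reverse.get(skill2) == skill1  (None == str is False)
def are_skills_similar_alt (skill1 : String) (skill2 : String) : Bool :=
  (pvReverse.get? skill1 == some skill2) || (pvReverse.get? skill2 == some skill1)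

-- ===== PRECONDITION & SPEC =====
def Spec_are_skills_similar (skill1 : String) (skill2 : String) (out : Bool) : Prop := out = are_skills_similar_alt skill1 skill2
instance (skill1 : String) (skill2 : String) (out : Bool) : Decidable (Spec_are_skills_similar skill1 skill2 out) := by unfold Spec_are_skills_similar; infer_instance

-- ===== CLAIM (what is proved, stated in full; the proofs are below) =====
def Claim_equal_are_skills_similar : Prop := ∀ (skill1 : String) (skill2 : String), Dom_are_skills_similar skill1 skill2 → Spec_are_skills_similar skill1 skill2 (are_skills_similar skill1 skill2)

-- ===== LEMMAS AND PROOFS =====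

-- A's loop with early return is List.any of its condition
lemma pvLoopA_eq_any (skill1 skill2 : String) (l : List (String × List String)) :
    pvLoopA skill1 skill2 l
      = l.any (fun p => (skill1 == p.1 && p.2.contains skill2) || (skill2 == p.1 && p.2.contains skill1)) := by
  induction l with
  | nil => rfl
  | cons p rest ih =>
    obtain ⟨m, vs⟩ := p
    simp only [pvLoopA, List.any_cons, ih]
    split <;> simp_all

-- the reverse dict, fully evaluated (closed term)
lemma pvReverse_eq : pvReverse = PySem.Dict.mk
    [ ("js", "javascript"), ("node.js", "javascript"), ("nodejs", "javascript"),
      ("py", "python"),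
      ("ml", "machine learning"), ("ai", "machine learning"), ("artificial intelligence", "machine learning"),
      ("postgres", "postgresql"),
      ("mongo", "mongodb"),
      ("k8s", "kubernetes"),
      ("containerization", "docker"),
      ("amazon web services", "aws"),
      ("google cloud", "gcp"),
      ("microsoft azure", "azure") ] := by decide

-- a reverse lookup succeeding with value t is exactly: some entry has main t and contains s
lemma pvLookup_char (s t : String) :
    List.any pvSynonyms (fun p => (t == p.1 && p.2.contains s)) = (pvReverse.get? s == some t) := by
  rw [pvReverse_eq]
  by_cases h : s = "js"
  · subst h; simp [pvSynonyms, PySem.Dict.get?_mk_cons, eq_comm]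
  by_cases h2 : s = "node.js"
  · subst h2; simp [pvSynonyms, PySem.Dict.get?_mk_cons, eq_comm]
  by_cases h3 : s = "nodejs"
  · subst h3; simp [pvSynonyms, PySem.Dict.get?_mk_cons, eq_comm]
  by_cases h4 : s = "py"
  · subst h4; simp [pvSynonyms, PySem.Dict.get?_mk_cons, eq_comm]
  by_cases h5 : s = "ml"
  · subst h5; simp [pvSynonyms, PySem.Dict.get?_mk_cons, eq_comm]
  by_cases h6 : s = "ai"
  · subst h6; simp [pvSynonyms, PySem.Dict.get?_mk_cons, eq_comm]
  by_cases h7 : s = "artificial intelligence"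
  · subst h7; simp [pvSynonyms, PySem.Dict.get?_mk_cons, eq_comm]
  by_cases h8 : s = "postgres"
  · subst h8; simp [pvSynonyms, PySem.Dict.get?_mk_cons, eq_comm]
  by_cases h9 : s = "mongo"
  · subst h9; simp [pvSynonyms, PySem.Dict.get?_mk_cons, eq_comm]
  by_cases h10 : s = "k8s"
  · subst h10; simp [pvSynonyms, PySem.Dict.get?_mk_cons, eq_comm]
  by_cases h11 : s = "containerization"
  · subst h11; simp [pvSynonyms, PySem.Dict.get?_mk_cons, eq_comm]
  by_cases h12 : s = "amazon web services"
  · subst h12; simp [pvSynonyms, PySem.Dict.get?_mk_cons, eq_comm]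
  by_cases h13 : s = "google cloud"
  · subst h13; simp [pvSynonyms, PySem.Dict.get?_mk_cons, eq_comm]
  by_cases h14 : s = "microsoft azure"
  · subst h14; simp [pvSynonyms, PySem.Dict.get?_mk_cons, eq_comm]
  simp [pvSynonyms, Ne.symm h, Ne.symm h2, Ne.symm h3, Ne.symm h4,
    Ne.symm h5, Ne.symm h6, Ne.symm h7, Ne.symm h8, Ne.symm h9, Ne.symm h10, Ne.symm h11,
    Ne.symm h12, Ne.symm h13, Ne.symm h14, PySem.Dict.get?, h, h2, h3, h4, h5, h6, h7, h8, h9, h10, h11, h12, h13, h14]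

lemma pvAny_or {α : Type} (l : List α) (f g : α → Bool) :
    l.any (fun x => f x || g x) = (l.any f || l.any g) := by
  induction l with
  | nil => rfl
  | cons a l ih => simp only [List.any_cons, ih]; cases f a <;> cases g a <;> simp

-- ===== VERDICT (by name: the statement is the Claim_ definition above) =====
theorem are_skills_similar_spec : Claim_equal_are_skills_similar := by
  intro s1 s2 _
  unfold Spec_are_skills_similar are_skills_similar are_skills_similar_alt
  rw [pvLoopA_eq_any, pvAny_or, pvLookup_char s2 s1, pvLookup_char s1 s2, Bool.or_comm]
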